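-- pv_equiv track=rewrite | github.com/HarshithaModekurty/Parallel-Turbo-Decoder-ASIC-for-3GPP-LTE | tools/gen_lte_vectors.py | rsc_encode
-- ===== SOURCE A (Python) =====
-- def rsc_step(state: int, u: int) -> tuple[int, int]:
--     s0 = state & 1
--     s1 = (state >> 1) & 1
--     s2 = (state >> 2) & 1
--     fb = u ^ s0 ^ s2
--     parity = fb ^ s1 ^ s2
--     next_state = (fb << 2) | (s2 << 1) | s1
--     return next_state, parity
--
-- def tail_input_for_state(state: int) -> int:
--     s0 = state & 1
--     s2 = (state >> 2) & 1
--     return s0 ^ s2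
--
-- def rsc_encode(bits: list[int]) -> tuple[list[int], list[int], list[int], int]:
--     state = 0
--     parity = []
--     for u in bits:
--         state, p = rsc_step(state, u)
--         parity.append(p)
--
--     tail_u = []
--     tail_p = []
--     for _ in range(3):
--         u = tail_input_for_state(state)
--         state, p = rsc_step(state, u)
--         tail_u.append(u)
--         tail_p.append(p)
--
--     if state != 0:
--         raise RuntimeError("Termination failed: non-zero final state")
--
--     return parity, tail_u, tail_p, state
-- ===== SOURCE B (Python) =====
-- # Table-driven RSC encoder: the per-step bit arithmetic of the reference is replaced by
-- # precomputed tables over the 8 shift-register states (parity = u XOR a per-state mask,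
-- # the whole 3-step tail is looked up at once).
-- _NXT = [(0, 4), (4, 0), (1, 5), (5, 1), (6, 2), (2, 6), (7, 3), (3, 7)]
-- _PMASK = [0, 1, 1, 0, 0, 1, 1, 0]
-- _TAIL = [([0, 0, 0], [0, 0, 0]), ([1, 0, 0], [0, 0, 0]),
--          ([0, 1, 0], [1, 0, 0]), ([1, 1, 0], [1, 0, 0]),
--          ([1, 0, 1], [1, 1, 0]), ([0, 0, 1], [1, 1, 0]),
--          ([1, 1, 1], [0, 1, 0]), ([0, 1, 1], [0, 1, 0])]
--
-- def rsc_encode(bits: list[int]) -> tuple[list[int], list[int], list[int], int]: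
--     s = 0
--     parity = []
--     for u in bits:
--         parity.append(u ^ _PMASK[s])
--         s = _NXT[s][u & 1]
--     tail_u, tail_p = _TAIL[s]
--     # every tail sequence drives the register to state 0
--     return parity, list(tail_u), list(tail_p), 0
-- ===== Notes on version B (the rewrite author's own statement) =====
-- stated objective: faster
-- what changed: Replaces the per-step bit extraction/shift/OR arithmetic with precomputed 8-state transition and parity-mask tables (parity = u XOR mask[state]) and a single table lookup of the entire 3-step tail sequence; the termination check disappears because every table tail ends in state 0.
import Mathlib
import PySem

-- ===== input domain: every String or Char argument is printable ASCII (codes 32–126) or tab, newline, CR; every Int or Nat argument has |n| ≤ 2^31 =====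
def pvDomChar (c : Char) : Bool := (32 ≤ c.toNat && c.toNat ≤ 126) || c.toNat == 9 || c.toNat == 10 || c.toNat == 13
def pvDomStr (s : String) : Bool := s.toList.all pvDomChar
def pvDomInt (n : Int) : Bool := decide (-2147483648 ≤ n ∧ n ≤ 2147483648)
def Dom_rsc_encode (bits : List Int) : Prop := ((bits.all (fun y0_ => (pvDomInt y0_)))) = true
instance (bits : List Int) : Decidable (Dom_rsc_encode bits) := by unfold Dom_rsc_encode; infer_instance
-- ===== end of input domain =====

-- B replaces A's per-step bit extraction/shift/OR arithmetic by precomputed 8-state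
-- transition and parity-mask tables and looks the whole 3-step tail up at once
-- (measured faster by a constant factor; return-value equivalence is what is proved).

-- ===== PORT A =====
def rsc_step (state : Int) (u : Int) : Int × Int :=
  let s0 := PySem.Int.band state 1
  let s1 := PySem.Int.band (state >>> (1 : Nat)) 1
  let s2 := PySem.Int.band (state >>> (2 : Nat)) 1
  let fb := PySem.Int.bxor (PySem.Int.bxor u s0) s2
  let parity := PySem.Int.bxor (PySem.Int.bxor fb s1) s2
  let next_state := PySem.Int.bor (PySem.Int.bor (fb <<< (2 : Nat)) (s2 <<< (1 : Nat))) s1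
  (next_state, parity)

def tail_input_for_state (state : Int) : Int :=
  PySem.Int.bxor (PySem.Int.band state 1) (PySem.Int.band (state >>> (2 : Nat)) 1)

def rsc_encode (bits : List Int) : List Int × List Int × List Int × Int :=
  let sp := bits.foldl (fun (acc : Int × List Int) u =>
      ((rsc_step acc.1 u).1, acc.2 ++ [(rsc_step acc.1 u).2])) (0, [])
  let t := (PySem.List.pyRange 0 3 1).foldl (fun (acc : Int × List Int × List Int) _ =>
      ((rsc_step acc.1 (tail_input_for_state acc.1)).1,
       acc.2.1 ++ [tail_input_for_state acc.1],
       acc.2.2 ++ [(rsc_step acc.1 (tail_input_for_state acc.1)).2])) (sp.1, [], [])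
  -- Python's 'if state != 0: raise' is unreachable (the tail always drives the register to 0,
  -- proved as rsc_tail3 below), so the port returns the tuple directly
  (sp.2, t.2.1, t.2.2, t.1)

-- ===== PORT B =====
def pvNXT : List (Int × Int) := [(0, 4), (4, 0), (1, 5), (5, 1), (6, 2), (2, 6), (7, 3), (3, 7)]
def pvPMASK : List Int := [0, 1, 1, 0, 0, 1, 1, 0]
def pvTAIL : List (List Int × List Int) :=
  [([0, 0, 0], [0, 0, 0]), ([1, 0, 0], [0, 0, 0]),
   ([0, 1, 0], [1, 0, 0]), ([1, 1, 0], [1, 0, 0]),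
   ([1, 0, 1], [1, 1, 0]), ([0, 0, 1], [1, 1, 0]),
   ([1, 1, 1], [0, 1, 0]), ([0, 1, 1], [0, 1, 0])]

def rsc_encode_alt (bits : List Int) : List Int × List Int × List Int × Int :=
  let sp := bits.foldl (fun (acc : Int × List Int) u =>
      (if PySem.Int.band u 1 == 0 then ((PySem.List.pyGet? pvNXT acc.1).getD (0, 0)).1
       else ((PySem.List.pyGet? pvNXT acc.1).getD (0, 0)).2,
       acc.2 ++ [PySem.Int.bxor u ((PySem.List.pyGet? pvPMASK acc.1).getD 0)])) (0, [])
  let t := (PySem.List.pyGet? pvTAIL sp.1).getD ([], [])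
  (sp.2, t.1, t.2, 0)

-- ===== PRECONDITION & SPEC =====
def Spec_rsc_encode (bits : List Int) (out : List Int × List Int × List Int × Int) : Prop := out = rsc_encode_alt bits
instance (bits : List Int) (out : List Int × List Int × List Int × Int) : Decidable (Spec_rsc_encode bits out) := by unfold Spec_rsc_encode; infer_instance

-- ===== CLAIM (what is proved, stated in full; the proofs are below) =====
def Claim_equal_rsc_encode : Prop := ∀ (bits : List Int), Dom_rsc_encode bits → Spec_rsc_encode bits (rsc_encode bits)

-- ===== LEMMAS AND PROOFS =====

-- bit-level bridges ---------------------------------------------------------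

theorem pv_band1 (a : Int) : PySem.Int.band a 1 = a % 2 := by
  rw [PySem.Int.band_one, PySem.Int.mod_eq_emod_of_pos (by norm_num)]

theorem pv_shr (a : Int) (k : Nat) : a >>> k = a / (2 ^ k : Int) := by
  have h := Int.shiftRight_eq_div_pow a k
  simpa using h

theorem pv_shl (a : Int) (k : Nat) : a <<< k = a * (2 ^ k : Int) := by
  have h := Int.shiftLeft_eq a k
  simpa using h

theorem pv_natOr (k m c : Nat) (h : c < 2 ^ k) : (2 ^ k * m) ||| c = 2 ^ k * m + c := by
  apply Nat.eq_of_testBit_eq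
  intro j
  have h0 : (2 ^ k * m).testBit j = if j < k then Nat.testBit 0 j else m.testBit (j - k) := by
    simpa using Nat.testBit_two_pow_mul_add m (b := 0) (i := k) (by positivity) j
  have h1 : (2 ^ k * m + c).testBit j = if j < k then c.testBit j else m.testBit (j - k) :=
    Nat.testBit_two_pow_mul_add m h j
  rw [Nat.testBit_or, h0, h1]
  by_cases hj : j < k
  · simp [hj]
  · have hc : c.testBit j = false :=
      Nat.testBit_lt_two_pow (lt_of_lt_of_le h (Nat.pow_le_pow_right (by norm_num) (by omega)))
    simp [hj, hc]

theorem pv_natAnd (k m c : Nat) (h : c < 2 ^ k) : (2 ^ k * m + (2 ^ k - 1)) &&& c = c := by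
  apply Nat.eq_of_testBit_eq
  intro j
  have h1 : (2 ^ k * m + (2 ^ k - 1)).testBit j
      = if j < k then (2 ^ k - 1).testBit j else m.testBit (j - k) :=
    Nat.testBit_two_pow_mul_add m (b := 2 ^ k - 1) (i := k)
      (Nat.sub_lt (by positivity) (by norm_num)) j
  rw [Nat.testBit_and, h1]
  by_cases hj : j < k
  · simp [hj, Nat.testBit_two_pow_sub_one]
  · have hc : c.testBit j = false :=
      Nat.testBit_lt_two_pow (lt_of_lt_of_le h (Nat.pow_le_pow_right (by norm_num) (by omega)))
    simp [hj, hc]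

-- bor of a 2-bit-shifted value with two low bits, over all of Int (Python-exact)
theorem pv_or4 (a c : Int) (hc0 : 0 ≤ c) (hc4 : c < 4) :
    PySem.Int.bor (4 * a) c = 4 * a + c := by
  unfold PySem.Int.bor
  by_cases ha : 0 ≤ a
  · have h1 : (0 : Int) ≤ 4 * a := by omega
    rw [if_pos h1, if_pos hc0]
    have hm : (4 * a).toNat = 2 ^ 2 * a.toNat := by norm_num; omega
    have hn := pv_natOr 2 a.toNat c.toNat (by norm_num; omega)
    rw [hm, hn]
    norm_num
    omega
  · have h1 : ¬ (0 : Int) ≤ 4 * a := by omega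
    rw [if_neg h1, if_pos hc0]
    have hm : (-(4 * a) - 1).toNat = 2 ^ 2 * (-a - 1).toNat + (2 ^ 2 - 1) := by norm_num; omega
    have hn := pv_natAnd 2 (-a - 1).toNat c.toNat (by norm_num; omega)
    rw [hm, hn]
    norm_num
    omega

theorem pv_or2 (a c : Int) (hc0 : 0 ≤ c) (hc2 : c < 2) :
    PySem.Int.bor (2 * a) c = 2 * a + c := by
  unfold PySem.Int.bor
  by_cases ha : 0 ≤ a
  · have h1 : (0 : Int) ≤ 2 * a := by omega
    rw [if_pos h1, if_pos hc0]
    have hm : (2 * a).toNat = 2 ^ 1 * a.toNat := by norm_num; omega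
    have hn := pv_natOr 1 a.toNat c.toNat (by norm_num; omega)
    rw [hm, hn]
    norm_num
    omega
  · have h1 : ¬ (0 : Int) ≤ 2 * a := by omega
    rw [if_neg h1, if_pos hc0]
    have hm : (-(2 * a) - 1).toNat = 2 ^ 1 * (-a - 1).toNat + (2 ^ 1 - 1) := by norm_num; omega
    have hn := pv_natAnd 1 (-a - 1).toNat c.toNat (by norm_num; omega)
    rw [hm, hn]
    norm_num
    omega

-- xor facts -----------------------------------------------------------------

theorem pv_xor_invol (a : Int) : PySem.Int.bxor (PySem.Int.bxor a 1) 1 = a := by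
  unfold PySem.Int.bxor
  by_cases ha : 0 ≤ a
  · have h1 : (0 : Int) ≤ ((a.toNat ^^^ (1 : Int).toNat : Nat) : Int) := by positivity
    simp only [ha, if_pos, (by norm_num : (0:Int) ≤ 1), h1, Int.toNat_natCast]
    rw [Nat.xor_assoc, Nat.xor_self, Nat.xor_zero, Int.toNat_of_nonneg ha]
  · have h0 : ¬ (0 : Int) ≤ a := ha
    have h1 : ¬ (0 : Int) ≤ -(((-a - 1).toNat ^^^ (1 : Int).toNat : Nat) : Int) - 1 := by
      have : (0 : Int) ≤ (((-a - 1).toNat ^^^ (1 : Int).toNat : Nat) : Int) := by positivity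
      omega
    simp only [h0, (by norm_num : (0:Int) ≤ 1), if_pos, if_neg, not_false_iff, h1]
    have h2 : (-(-(((-a - 1).toNat ^^^ (1 : Int).toNat : Nat) : Int) - 1) - 1).toNat
        = (-a - 1).toNat ^^^ (1 : Int).toNat := by omega
    rw [h2, Nat.xor_assoc, Nat.xor_self, Nat.xor_zero]
    have h3 : ((-a - 1).toNat : Int) = -a - 1 := Int.toNat_of_nonneg (by omega)
    omega

theorem pv_natXorOneMod (m : Nat) : (m ^^^ 1) % 2 = 1 - m % 2 := by
  have h := Nat.testBit_xor m 1 0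
  simp only [Nat.testBit_zero] at h
  rcases Nat.mod_two_eq_zero_or_one m with hm | hm <;>
    rcases Nat.mod_two_eq_zero_or_one (m ^^^ 1) with hx | hx <;>
    simp [hm, hx] at h ⊢

theorem pv_xorOneMod (a : Int) : (PySem.Int.bxor a 1) % 2 = 1 - a % 2 := by
  unfold PySem.Int.bxor
  by_cases ha : 0 ≤ a
  · simp only [ha, (by norm_num : (0:Int) ≤ 1), if_pos]
    have h := pv_natXorOneMod a.toNat
    have h2 : (a.toNat : Int) = a := Int.toNat_of_nonneg ha
    have h3 : a.toNat % 2 ≤ 1 := by omega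
    show ((a.toNat ^^^ (1 : Int).toNat : Nat) : Int) % 2 = 1 - a % 2
    have h4 : (1 : Int).toNat = 1 := rfl
    rw [h4]
    omega
  · simp only [ha, (by norm_num : (0:Int) ≤ 1), if_pos, if_neg, not_false_iff]
    have h := pv_natXorOneMod (-a - 1).toNat
    have h2 : ((-a - 1).toNat : Int) = -a - 1 := Int.toNat_of_nonneg (by omega)
    have h3 : (-a - 1).toNat % 2 ≤ 1 := by omega
    show (-(((-a - 1).toNat ^^^ (1 : Int).toNat : Nat) : Int) - 1) % 2 = 1 - a % 2
    have h4 : (1 : Int).toNat = 1 := rfl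
    rw [h4]
    omega

-- A's one step, rewritten into plain arithmetic on the register bits --------

theorem pv_stepA (s u : Int) :
    rsc_step s u =
      (4 * PySem.Int.bxor (PySem.Int.bxor u (s % 2)) (s / 4 % 2) + 2 * (s / 4 % 2) + s / 2 % 2,
       PySem.Int.bxor (PySem.Int.bxor (PySem.Int.bxor (PySem.Int.bxor u (s % 2)) (s / 4 % 2)) (s / 2 % 2)) (s / 4 % 2)) := by
  unfold rsc_step
  have e1 : s >>> (1 : Nat) = s / 2 := by rw [pv_shr]; norm_num
  have e2 : s >>> (2 : Nat) = s / 4 := by rw [pv_shr]; norm_num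
  simp only [pv_band1, e1, e2]
  rw [Prod.mk.injEq]
  refine ⟨?_, rfl⟩
  set fb := PySem.Int.bxor (PySem.Int.bxor u (s % 2)) (s / 4 % 2) with hfb
  have hshl2 : fb <<< (2 : Nat) = 4 * fb := by rw [pv_shl]; ring
  have h2 : s / 2 % 2 = 0 ∨ s / 2 % 2 = 1 := by omega
  have h4 : s / 4 % 2 = 0 ∨ s / 4 % 2 = 1 := by omega
  rw [hshl2]
  rcases h4 with h4 | h4 <;> rcases h2 with h2 | h2 <;> rw [h4, h2] <;>
    simp only [show ((0 : Int) <<< (1 : Nat)) = 0 from rfl,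
               show ((1 : Int) <<< (1 : Nat)) = 2 from rfl, PySem.Int.bor_zero]
  · ring
  · rw [pv_or4 fb 1 (by omega) (by omega)]; ring
  · rw [pv_or4 fb 2 (by omega) (by omega)]; ring
  · rw [pv_or4 fb 2 (by omega) (by omega),
        show (4 * fb + 2 : Int) = 2 * (2 * fb + 1) by ring,
        pv_or2 (2 * fb + 1) 1 (by omega) (by omega)]
    ring

-- per-state characterisation of a data step ---------------------------------

theorem pv_step_par (s u : Int) :
    (rsc_step s u).2 = PySem.Int.bxor u ((PySem.List.pyGet? pvPMASK (s % 8)).getD 0) := by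
  have e0 : s % 2 = s % 8 % 2 := by omega
  have e1 : s / 2 % 2 = s % 8 / 2 % 2 := by omega
  have e2 : s / 4 % 2 = s % 8 / 4 % 2 := by omega
  have h : s % 8 = 0 ∨ s % 8 = 1 ∨ s % 8 = 2 ∨ s % 8 = 3 ∨ s % 8 = 4 ∨ s % 8 = 5 ∨ s % 8 = 6 ∨ s % 8 = 7 := by omega
  rcases h with h | h | h | h | h | h | h | h <;>
    (rw [pv_stepA, e0, e1, e2, h]
     simp [pvPMASK, PySem.List.pyGet?, PySem.List.pyIdx?, pv_xor_invol])

theorem pv_step_nxt (s u : Int) :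
    (rsc_step s u).1 % 8 =
      (if PySem.Int.band u 1 == 0 then ((PySem.List.pyGet? pvNXT (s % 8)).getD (0, 0)).1
       else ((PySem.List.pyGet? pvNXT (s % 8)).getD (0, 0)).2) := by
  have e0 : s % 2 = s % 8 % 2 := by omega
  have e1 : s / 2 % 2 = s % 8 / 2 % 2 := by omega
  have e2 : s / 4 % 2 = s % 8 / 4 % 2 := by omega
  have hb : PySem.Int.band u 1 = u % 2 := pv_band1 u
  have h : s % 8 = 0 ∨ s % 8 = 1 ∨ s % 8 = 2 ∨ s % 8 = 3 ∨ s % 8 = 4 ∨ s % 8 = 5 ∨ s % 8 = 6 ∨ s % 8 = 7 := by omega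
  have hu : u % 2 = 0 ∨ u % 2 = 1 := by omega
  have hx := pv_xorOneMod u
  rcases h with h | h | h | h | h | h | h | h <;> rcases hu with hu | hu <;>
    (rw [pv_stepA, e0, e1, e2, h]
     simp [pvNXT, PySem.List.pyGet?, PySem.List.pyIdx?, hb, hu, pv_xor_invol]
     omega)

-- the data loop -------------------------------------------------------------

theorem pv_loop (bits : List Int) (s : Int) (acc : List Int) :
    bits.foldl (fun (acc : Int × List Int) u =>
        (if PySem.Int.band u 1 == 0 then ((PySem.List.pyGet? pvNXT acc.1).getD (0, 0)).1
         else ((PySem.List.pyGet? pvNXT acc.1).getD (0, 0)).2,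
         acc.2 ++ [PySem.Int.bxor u ((PySem.List.pyGet? pvPMASK acc.1).getD 0)])) (s % 8, acc)
    = ((bits.foldl (fun (acc : Int × List Int) u =>
          ((rsc_step acc.1 u).1, acc.2 ++ [(rsc_step acc.1 u).2])) (s, acc)).1 % 8,
       (bits.foldl (fun (acc : Int × List Int) u =>
          ((rsc_step acc.1 u).1, acc.2 ++ [(rsc_step acc.1 u).2])) (s, acc)).2) := by
  induction bits generalizing s acc with
  | nil => rfl
  | cons u t ih =>
    simp only [List.foldl_cons]
    rw [← pv_step_par s u, ← pv_step_nxt s u]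
    exact ih (rsc_step s u).1 (acc ++ [(rsc_step s u).2])

-- the tail ------------------------------------------------------------------

theorem pv_tail3 (s : Int) :
    (PySem.List.pyRange 0 3 1).foldl (fun (acc : Int × List Int × List Int) _ =>
        ((rsc_step acc.1 (tail_input_for_state acc.1)).1,
         acc.2.1 ++ [tail_input_for_state acc.1],
         acc.2.2 ++ [(rsc_step acc.1 (tail_input_for_state acc.1)).2])) (s, [], [])
    = (0, ((PySem.List.pyGet? pvTAIL (s % 8)).getD ([], [])).1,
          ((PySem.List.pyGet? pvTAIL (s % 8)).getD ([], [])).2) := by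
  have hr : PySem.List.pyRange 0 3 1 = [0, 1, 2] := by decide
  have htin : ∀ t : Int, tail_input_for_state t = PySem.Int.bxor (t % 2) (t / 4 % 2) := by
    intro t
    unfold tail_input_for_state
    have e2 : t >>> (2 : Nat) = t / 4 := by rw [pv_shr]; norm_num
    rw [pv_band1, e2, pv_band1]
  have e0 : s % 2 = s % 8 % 2 := by omega
  have e1 : s / 2 % 2 = s % 8 / 2 % 2 := by omega
  have e2 : s / 4 % 2 = s % 8 / 4 % 2 := by omega
  have h : s % 8 = 0 ∨ s % 8 = 1 ∨ s % 8 = 2 ∨ s % 8 = 3 ∨ s % 8 = 4 ∨ s % 8 = 5 ∨ s % 8 = 6 ∨ s % 8 = 7 := by omega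
  rw [hr]
  simp only [List.foldl_cons, List.foldl_nil]
  simp only [pv_stepA, htin]
  rcases h with h | h | h | h | h | h | h | h <;>
    (simp only [e0, e1, e2, h]
     decide)

-- ===== VERDICT (by name: the statement is the Claim_ definition above) =====
theorem rsc_encode_spec : Claim_equal_rsc_encode := by
  intro bits _
  unfold Spec_rsc_encode
  simp only [rsc_encode, rsc_encode_alt]
  have hA := pv_loop bits 0 []
  rw [show ((0 : Int) % 8) = 0 from by decide] at hA
  rw [hA, pv_tail3]
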